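-- pv_equiv track=rewrite | github.com/tomduck/bassclef | scripts/postprocess.py | tidy_html
-- ===== SOURCE A (Python) =====
-- def tidy_html(lines):
--     """Aesthetic improvements to pandoc's html output."""
--
--     # Add some space around hr tags
--     for i, line in enumerate(lines):
--         lines[i] = line.replace('<hr />', '\n<hr />\n')
--
--     # Don't separate </div> tags from their descriptions
--     for i, line in enumerate(lines[:-1]):
--         if line.startswith('</div>') and lines[i+1].startswith('<!--') \
--             and lines[i+1].rstrip().endswith('-->'):
--             lines[i] = lines[i][:-1] + ' ' + lines[i+1] + '\n'
--             lines[i+1] = None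
--             continue
--         if line.startswith('</div>') and lines[i+1].startswith('<p><!--') \
--             and lines[i+1].rstrip().endswith('--></p>'):
--             lines[i] = lines[i][:-1] + ' ' + lines[i+1][3:-5] + '\n'
--             lines[i+1] = None
--             continue
--     lines = [line for line in lines if line is not None]
--
--     # Put some space before the div content-body tag
--     for i, line in enumerate(lines):
--         if line.startswith('<div class="content-body">'):
--             lines[i] = '\n' + line
--
--     return lines
-- ===== SOURCE B (Python) =====
-- def tidy_html(lines):
--     """Aesthetic improvements to pandoc's html output (single fused pass)."""
--     out = []
--     n = len(lines)
--     i = 0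
--     while i < n:
--         line = lines[i].replace('<hr />', '\n<hr />\n')
--         if i + 1 < n and line.startswith('</div>'):
--             nxt = lines[i + 1].replace('<hr />', '\n<hr />\n')
--             if nxt.startswith('<!--') and nxt.rstrip().endswith('-->'):
--                 out.append(line[:-1] + ' ' + nxt + '\n')
--                 i += 2
--                 continue
--             if nxt.startswith('<p><!--') and nxt.rstrip().endswith('--></p>'):
--                 out.append(line[:-1] + ' ' + nxt[3:-5] + '\n')
--                 i += 2
--                 continue
--         if line.startswith('<div class="content-body">'):
--             out.append('\n' + line)
--         else:
--             out.append(line)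
--         i += 1
--     return out
-- ===== Notes on version B (the rewrite author's own statement) =====
-- stated objective: simpler
-- what changed: Replaces A's three list passes plus a None-sentinel-and-filter representation with one fused index-driven pass that appends each (hr-spaced, possibly merged or '\n'-prefixed) line and skips a merged comment line directly.
import Mathlib
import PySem

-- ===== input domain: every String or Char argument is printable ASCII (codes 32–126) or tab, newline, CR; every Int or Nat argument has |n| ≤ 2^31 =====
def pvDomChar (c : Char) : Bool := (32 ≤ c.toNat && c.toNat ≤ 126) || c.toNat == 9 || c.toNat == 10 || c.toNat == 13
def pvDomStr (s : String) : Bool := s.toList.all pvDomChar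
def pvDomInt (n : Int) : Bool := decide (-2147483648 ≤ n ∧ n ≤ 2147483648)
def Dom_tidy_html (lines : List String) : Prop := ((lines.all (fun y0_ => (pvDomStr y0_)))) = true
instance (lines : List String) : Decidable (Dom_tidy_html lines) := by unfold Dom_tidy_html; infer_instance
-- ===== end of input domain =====

-- B fuses A's three passes and the None-sentinel filter into one index-driven pass that skips the
-- merged line directly; equivalence is about the RETURN value only (Python A also mutates its
-- argument list in place, B does not).

-- ===== PORT A =====
-- shared line-level helpers: both Pythons apply literally these same string expressions
def pvRep (s : String) : String := PySem.Str.replace s "<hr />" "\n<hr />\n"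
def pvCond1 (x y : String) : Bool :=
  PySem.Str.startswith x "</div>" && PySem.Str.startswith y "<!--"
    && PySem.Str.endswith (PySem.Str.rstrip y) "-->"
def pvCond2 (x y : String) : Bool :=
  PySem.Str.startswith x "</div>" && PySem.Str.startswith y "<p><!--"
    && PySem.Str.endswith (PySem.Str.rstrip y) "--></p>"
def pvMerge1 (x y : String) : String :=
  PySem.Str.slice x none (some (-1)) ++ " " ++ y ++ "\n"
def pvMerge2 (x y : String) : String :=
  PySem.Str.slice x none (some (-1)) ++ " " ++ PySem.Str.slice y (some 3) (some (-5)) ++ "\n"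
def pvFix (l : String) : String :=
  if PySem.Str.startswith l "<div class=\"content-body\">" then "\n" ++ l else l

-- lines[j] read from the live list of pass 2; the None case would be a Python TypeError but is
-- unreachable (None is written only over a comment line, which never passes the '</div>' test),
-- so the default "" is never used.
def pvAGet (s : List (Option String)) (i : Int) : String :=
  (PySem.List.pyGetD s i none).getD ""

-- one iteration of A's second for-loop: i, line from enumerate(lines[:-1]), state = live list
def pvBody (s : List (Option String)) : Int × String → List (Option String)
  | (i, line) =>
    if pvCond1 line (pvAGet s (i + 1)) then
      PySem.List.pySetD
        (PySem.List.pySetD s i (some (pvMerge1 (pvAGet s i) (pvAGet s (i + 1)))))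
        (i + 1) none
    else if pvCond2 line (pvAGet s (i + 1)) then
      PySem.List.pySetD
        (PySem.List.pySetD s i (some (pvMerge2 (pvAGet s i) (pvAGet s (i + 1)))))
        (i + 1) none
    else s

def tidy_html (lines : List String) : List String :=
  -- pass 1: lines[i] = line.replace('<hr />', '\n<hr />\n')
  let l1 : List String := lines.map pvRep
  -- pass 2: merge '</div>' lines with a following comment line, marking the comment None
  let st : List (Option String) :=
    (PySem.List.enumerate (PySem.List.slice l1 none (some (-1))) 0).foldl pvBody (l1.map some)
  -- lines = [line for line in lines if line is not None]
  let l2 : List String := st.filterMap id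
  -- pass 3: prepend '\n' before the content-body div tag
  l2.map pvFix

-- ===== PORT B =====
-- Source B's single while-loop over the index, as the obvious structural recursion on the list
def pvScan : List String → List String
  | [] => []
  | [x] => [pvFix (pvRep x)]
  | x :: y :: t =>
    let line := pvRep x
    let nxt := pvRep y
    if pvCond1 line nxt then pvMerge1 line nxt :: pvScan t
    else if pvCond2 line nxt then pvMerge2 line nxt :: pvScan t
    else pvFix line :: pvScan (y :: t)

def tidy_html_alt (lines : List String) : List String := pvScan lines

-- ===== PRECONDITION & SPEC =====
def Spec_tidy_html (lines : List String) (out : List String) : Prop := out = tidy_html_alt lines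
instance (lines : List String) (out : List String) : Decidable (Spec_tidy_html lines out) := by unfold Spec_tidy_html; infer_instance

-- ===== CLAIM (what is proved, stated in full; the proofs are below) =====
def Claim_equal_tidy_html : Prop := ∀ (lines : List String), Dom_tidy_html lines → Spec_tidy_html lines (tidy_html lines)

-- ===== LEMMAS AND PROOFS =====

-- pure characterisation of A's pass 2: a left-to-right pairwise merge leaving None holes
def pvMrg : List String → List (Option String)
  | [] => []
  | [x] => [some x]
  | x :: y :: t =>
    if pvCond1 x y then some (pvMerge1 x y) :: none :: pvMrg t
    else if pvCond2 x y then some (pvMerge2 x y) :: none :: pvMrg t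
    else some x :: pvMrg (y :: t)

-- a comment line (starting '<!--' or '<p><!--') never starts with '</div>'
theorem pv_comment_not_div (y : String)
    (h : PySem.Str.startswith y "<!--" = true ∨ PySem.Str.startswith y "<p><!--" = true) :
    PySem.Str.startswith y "</div>" = false := by
  rw [Bool.eq_false_iff]
  intro hd
  simp only [PySem.Str.startswith_eq] at h hd
  obtain ⟨t2, e2⟩ := (PySem.Chars.startswith_iff _ _).1 hd
  rcases h with h | h <;> {
    obtain ⟨t1, e1⟩ := (PySem.Chars.startswith_iff _ _).1 h
    rw [← e1] at e2
    simp at e2 }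

-- reading the live list at the loop's indices
theorem pvAGet_at0 (done : List (Option String)) (o : Option String) (rest : List (Option String)) :
    pvAGet (done ++ o :: rest) (done.length : Int) = o.getD "" := by
  simp [pvAGet]

theorem pvAGet_at1 (done : List (Option String)) (o o' : Option String)
    (rest : List (Option String)) :
    pvAGet (done ++ o :: o' :: rest) ((done.length : Int) + 1) = o'.getD "" := by
  have h : (done.length : Int) + 1 = ((done.length + 1 : Nat) : Int) := by push_cast; ring
  rw [h, pvAGet, PySem.List.pyGetD_natCast]
  simp [List.getD]

theorem pvSet_at0 (done : List (Option String)) (o : Option String)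
    (rest : List (Option String)) (v : Option String) :
    PySem.List.pySetD (done ++ o :: rest) (done.length : Int) v = done ++ v :: rest := by
  simp

theorem pvSet_at1 (done : List (Option String)) (o o' : Option String)
    (rest : List (Option String)) (v : Option String) :
    PySem.List.pySetD (done ++ o :: o' :: rest) ((done.length : Int) + 1) v
      = done ++ o :: v :: rest := by
  have h : (done.length : Int) + 1 = ((done.length + 1 : Nat) : Int) := by push_cast; ring
  rw [h, PySem.List.pySetD_natCast]
  simp

-- one loop step, evaluated on the decomposed live list
theorem pvBody_eval (done : List (Option String)) (a b : Option String)
    (rest : List (Option String)) (line : String) :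
    pvBody (done ++ a :: b :: rest) ((done.length : Int), line) =
      if pvCond1 line (b.getD "") then done ++ some (pvMerge1 (a.getD "") (b.getD "")) :: none :: rest
      else if pvCond2 line (b.getD "") then done ++ some (pvMerge2 (a.getD "") (b.getD "")) :: none :: rest
      else done ++ a :: b :: rest := by
  show (if pvCond1 line (pvAGet (done ++ a :: b :: rest) ((done.length : Int) + 1)) then _
        else if pvCond2 line (pvAGet (done ++ a :: b :: rest) ((done.length : Int) + 1)) then _ else _) = _
  simp only [pvAGet_at1, pvAGet_at0, pvSet_at0, pvSet_at1]

-- cast bookkeeping for the loop index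
theorem pv_len1 (done : List (Option String)) (o : Option String) :
    (done.length : Int) + 1 = (((done ++ [o]).length : Nat) : Int) := by
  simp

theorem pv_len2 (done : List (Option String)) (o o' : Option String) :
    (((done ++ [o]).length : Nat) : Int) + 1 = (((done ++ [o, o']).length : Nat) : Int) := by
  simp
  ring

-- the fold of A's pass 2 computes pvMrg, position by position
theorem pvPass2 (u : List String) : ∀ (done : List (Option String)),
    (PySem.List.enumerate u.dropLast (done.length : Int)).foldl pvBody (done ++ u.map some)
      = done ++ pvMrg u := by
  induction u using pvMrg.induct with
  | case1 => intro done; simp [pvMrg, PySem.List.enumerate_nil]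
  | case2 x => intro done; simp [pvMrg, PySem.List.enumerate_nil]
  | case3 x y t hc ih =>
    intro done
    rw [pvMrg, if_pos hc]
    cases t with
    | nil =>
      rw [show (x :: y :: ([] : List String)).dropLast = [x] from rfl,
          show (x :: y :: ([] : List String)).map some = some x :: some y :: ([] : List (Option String)) from rfl]
      simp only [PySem.List.enumerate_cons, PySem.List.enumerate_nil, List.foldl_cons, List.foldl_nil]
      rw [pvBody_eval done (some x) (some y) [] x, if_pos (by simpa using hc)]
      simp [pvMrg]
    | cons z ts =>
      rw [List.dropLast_cons₂, List.dropLast_cons₂,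
          show (x :: y :: z :: ts).map some = some x :: some y :: some z :: ts.map some from rfl]
      simp only [PySem.List.enumerate_cons, List.foldl_cons]
      rw [pvBody_eval done (some x) (some y) (some z :: ts.map some) x, if_pos (by simpa using hc)]
      simp only [Option.getD_some]
      have hy : PySem.Str.startswith y "<!--" = true := by
        simp only [pvCond1, Bool.and_eq_true] at hc; exact hc.1.2
      have hnd : PySem.Str.startswith y "</div>" = false := pv_comment_not_div y (Or.inl hy)
      simp [PySem.Str.startswith_eq] at hnd
      -- second step: line y is a comment, both conditions false, state unchanged
      rw [show done ++ some (pvMerge1 x y) :: none :: some z :: ts.map some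
            = (done ++ [some (pvMerge1 x y)]) ++ none :: some z :: ts.map some by simp,
          pv_len1 done (some (pvMerge1 x y))]
      rw [pvBody_eval (done ++ [some (pvMerge1 x y)]) none (some z) (ts.map some) y,
          if_neg (by simp [pvCond1, hnd]), if_neg (by simp [pvCond2, hnd])]
      rw [show (done ++ [some (pvMerge1 x y)]) ++ none :: some z :: ts.map some
            = (done ++ [some (pvMerge1 x y), none]) ++ (z :: ts).map some by simp,
          pv_len2 done (some (pvMerge1 x y)) none]
      rw [ih]
      simp
  | case4 x y t hc1 hc2 ih =>
    intro done
    rw [pvMrg, if_neg (by simp [hc1]), if_pos hc2]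
    cases t with
    | nil =>
      rw [show (x :: y :: ([] : List String)).dropLast = [x] from rfl,
          show (x :: y :: ([] : List String)).map some = some x :: some y :: ([] : List (Option String)) from rfl]
      simp only [PySem.List.enumerate_cons, PySem.List.enumerate_nil, List.foldl_cons, List.foldl_nil]
      rw [pvBody_eval done (some x) (some y) [] x, if_neg (by simpa using hc1),
          if_pos (by simpa using hc2)]
      simp [pvMrg]
    | cons z ts =>
      rw [List.dropLast_cons₂, List.dropLast_cons₂,
          show (x :: y :: z :: ts).map some = some x :: some y :: some z :: ts.map some from rfl]
      simp only [PySem.List.enumerate_cons, List.foldl_cons]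
      rw [pvBody_eval done (some x) (some y) (some z :: ts.map some) x, if_neg (by simpa using hc1),
          if_pos (by simpa using hc2)]
      simp only [Option.getD_some]
      have hy : PySem.Str.startswith y "<p><!--" = true := by
        simp only [pvCond2, Bool.and_eq_true] at hc2; exact hc2.1.2
      have hnd : PySem.Str.startswith y "</div>" = false := pv_comment_not_div y (Or.inr hy)
      simp [PySem.Str.startswith_eq] at hnd
      rw [show done ++ some (pvMerge2 x y) :: none :: some z :: ts.map some
            = (done ++ [some (pvMerge2 x y)]) ++ none :: some z :: ts.map some by simp,
          pv_len1 done (some (pvMerge2 x y))]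
      rw [pvBody_eval (done ++ [some (pvMerge2 x y)]) none (some z) (ts.map some) y,
          if_neg (by simp [pvCond1, hnd]), if_neg (by simp [pvCond2, hnd])]
      rw [show (done ++ [some (pvMerge2 x y)]) ++ none :: some z :: ts.map some
            = (done ++ [some (pvMerge2 x y), none]) ++ (z :: ts).map some by simp,
          pv_len2 done (some (pvMerge2 x y)) none]
      rw [ih]
      simp
  | case5 x y t hc1 hc2 ih =>
    intro done
    rw [pvMrg, if_neg (by simp [hc1]), if_neg (by simp [hc2])]
    rw [List.dropLast_cons₂,
        show (x :: y :: t).map some = some x :: some y :: t.map some from rfl]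
    simp only [PySem.List.enumerate_cons, List.foldl_cons]
    rw [pvBody_eval done (some x) (some y) (t.map some) x, if_neg (by simpa using hc1),
        if_neg (by simpa using hc2)]
    rw [show done ++ some x :: some y :: t.map some = (done ++ [some x]) ++ (y :: t).map some by simp,
        pv_len1 done (some x)]
    rw [ih]
    simp

-- a merged line starts '</…', never '<div class="content-body">', so pass 3 leaves it alone
theorem pv_startswith_merged_false (x r : String)
    (hx : PySem.Str.startswith x "</div>" = true) :
    PySem.Str.startswith (PySem.Str.slice x none (some (-1)) ++ r)
      "<div class=\"content-body\">" = false := by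
  rw [Bool.eq_false_iff]
  intro h
  simp only [PySem.Str.startswith_eq] at h hx
  obtain ⟨t1, e1⟩ := (PySem.Chars.startswith_iff _ _).1 hx
  obtain ⟨t2, e2⟩ := (PySem.Chars.startswith_iff _ _).1 h
  rw [String.toList_append, PySem.Str.slice_to_neg_one, ← e1] at e2
  simp at e2

theorem pv_fix_merge1 (x y : String) (h : pvCond1 x y = true) :
    pvFix (pvMerge1 x y) = pvMerge1 x y := by
  have hx : PySem.Str.startswith x "</div>" = true := by
    simp only [pvCond1, Bool.and_eq_true] at h; exact h.1.1
  rw [pvFix, pvMerge1]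
  rw [show PySem.Str.slice x none (some (-1)) ++ " " ++ y ++ "\n"
        = PySem.Str.slice x none (some (-1)) ++ (" " ++ y ++ "\n") by simp [String.append_assoc]]
  rw [pv_startswith_merged_false x _ hx]
  simp [String.append_assoc]

theorem pv_fix_merge2 (x y : String) (h : pvCond2 x y = true) :
    pvFix (pvMerge2 x y) = pvMerge2 x y := by
  have hx : PySem.Str.startswith x "</div>" = true := by
    simp only [pvCond2, Bool.and_eq_true] at h; exact h.1.1
  rw [pvFix, pvMerge2]
  rw [show PySem.Str.slice x none (some (-1)) ++ " " ++ PySem.Str.slice y (some 3) (some (-5)) ++ "\n"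
        = PySem.Str.slice x none (some (-1)) ++ (" " ++ PySem.Str.slice y (some 3) (some (-5)) ++ "\n")
        by simp [String.append_assoc]]
  rw [pv_startswith_merged_false x _ hx]
  simp [String.append_assoc]

-- dropping the None holes of pvMrg and applying pass 3 is exactly B's single scan
theorem pvScan_cons₂ (x y : String) (t : List String) :
    pvScan (x :: y :: t) =
      if pvCond1 (pvRep x) (pvRep y) then pvMerge1 (pvRep x) (pvRep y) :: pvScan t
      else if pvCond2 (pvRep x) (pvRep y) then pvMerge2 (pvRep x) (pvRep y) :: pvScan t
      else pvFix (pvRep x) :: pvScan (y :: t) := rfl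

theorem pvScan_eq (u : List String) :
    ((pvMrg (u.map pvRep)).filterMap id).map pvFix = pvScan u := by
  induction u using pvScan.induct with
  | case1 => simp [pvMrg, pvScan]
  | case2 x => simp [pvMrg, pvScan]
  | case3 x y t line nxt hc ih =>
    have hc' : pvCond1 (pvRep x) (pvRep y) = true := hc
    rw [pvScan_cons₂, if_pos hc']
    rw [show (x :: y :: t).map pvRep = pvRep x :: pvRep y :: t.map pvRep from rfl,
        pvMrg, if_pos hc']
    rw [show (some (pvMerge1 (pvRep x) (pvRep y)) :: none :: pvMrg (t.map pvRep)).filterMap id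
          = pvMerge1 (pvRep x) (pvRep y) :: (pvMrg (t.map pvRep)).filterMap id from rfl,
        List.map_cons, pv_fix_merge1 _ _ hc', ih]
  | case4 x y t line nxt hc1 hc2 ih =>
    have hc1' : ¬ pvCond1 (pvRep x) (pvRep y) = true := hc1
    have hc2' : pvCond2 (pvRep x) (pvRep y) = true := hc2
    rw [pvScan_cons₂, if_neg (by simp [hc1']), if_pos hc2']
    rw [show (x :: y :: t).map pvRep = pvRep x :: pvRep y :: t.map pvRep from rfl,
        pvMrg, if_neg (by simp [hc1']), if_pos hc2']
    rw [show (some (pvMerge2 (pvRep x) (pvRep y)) :: none :: pvMrg (t.map pvRep)).filterMap id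
          = pvMerge2 (pvRep x) (pvRep y) :: (pvMrg (t.map pvRep)).filterMap id from rfl,
        List.map_cons, pv_fix_merge2 _ _ hc2', ih]
  | case5 x y t line nxt hc1 hc2 ih =>
    have hc1' : ¬ pvCond1 (pvRep x) (pvRep y) = true := hc1
    have hc2' : ¬ pvCond2 (pvRep x) (pvRep y) = true := hc2
    rw [pvScan_cons₂, if_neg (by simp [hc1']), if_neg (by simp [hc2'])]
    rw [show (x :: y :: t).map pvRep = pvRep x :: pvRep y :: t.map pvRep from rfl,
        pvMrg, if_neg (by simp [hc1']), if_neg (by simp [hc2'])]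
    rw [show pvRep y :: t.map pvRep = (y :: t).map pvRep from rfl]
    rw [show (some (pvRep x) :: pvMrg ((y :: t).map pvRep)).filterMap id
          = pvRep x :: (pvMrg ((y :: t).map pvRep)).filterMap id from rfl,
        List.map_cons, ih]

theorem pv_main (lines : List String) : tidy_html lines = tidy_html_alt lines := by
  show ((List.foldl pvBody ((lines.map pvRep).map some)
          (PySem.List.enumerate (PySem.List.slice (lines.map pvRep) none (some (-1))) 0)).filterMap
        id).map pvFix
      = pvScan lines
  rw [PySem.List.slice_to_neg_one]
  have h := pvPass2 (lines.map pvRep) []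
  simp only [List.nil_append, List.length_nil, Nat.cast_zero] at h
  rw [h, pvScan_eq]

-- ===== VERDICT (by name: the statement is the Claim_ definition above) =====
theorem tidy_html_spec : Claim_equal_tidy_html := by
  intro lines _
  unfold Spec_tidy_html
  exact pv_main lines
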